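-- pv_equiv track=rewrite | github.com/ntien1706/tien_len_mien_nam | core_engine/rules.py | _is_pair_sequence
-- ===== SOURCE A (Python) =====
-- from typing import List, Optional
--
-- def _is_pair_sequence(values: List[int], expected_pairs: int) -> bool:
--     # No 2 allowed in pair sequences
--     if 12 in values:
--         return False
--
--     # Values should appear exactly twice each, and be consecutive
--     if len(set(values)) != expected_pairs:
--         return False
--
--     from collections import Counter
--     counts = Counter(values)
--     if any(c != 2 for c in counts.values()):
--         return False
--
--     unique_vals = sorted(list(set(values)))
--     for i in range(len(unique_vals) - 1):
--         if unique_vals[i+1] != unique_vals[i] + 1: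
--             return False
--     return True
-- ===== SOURCE B (Python) =====
-- from typing import List
--
-- def _is_pair_sequence(values: List[int], expected_pairs: int) -> bool:
--     if 12 in values:
--         return False
--     uniq = set(values)
--     if len(uniq) != expected_pairs:
--         return False
--     if any(values.count(v) != 2 for v in uniq):
--         return False
--     if uniq and max(uniq) - min(uniq) != len(uniq) - 1:
--         return False
--     return True
-- ===== Notes on version B (the rewrite author's own statement) =====
-- stated objective: simpler
-- what changed: Replaced the Counter pass with per-element count checks over the distinct values and replaced the sort + adjacent-difference scan with a closed-form max-min range test (consecutive distinct values iff max - min == len - 1), eliminating the sort.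
import Mathlib
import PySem

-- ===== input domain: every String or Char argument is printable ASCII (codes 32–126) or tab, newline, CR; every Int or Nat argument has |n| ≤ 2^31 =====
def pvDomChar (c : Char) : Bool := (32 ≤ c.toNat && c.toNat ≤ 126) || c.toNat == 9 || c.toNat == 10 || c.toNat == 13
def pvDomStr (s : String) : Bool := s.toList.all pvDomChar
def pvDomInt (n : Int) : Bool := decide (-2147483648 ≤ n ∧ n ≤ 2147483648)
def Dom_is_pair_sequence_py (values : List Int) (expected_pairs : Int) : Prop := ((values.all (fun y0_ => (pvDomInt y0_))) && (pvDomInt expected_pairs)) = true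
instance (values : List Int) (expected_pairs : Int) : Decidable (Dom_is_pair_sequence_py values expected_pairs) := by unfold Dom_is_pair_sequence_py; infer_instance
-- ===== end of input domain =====

-- B replaces A's Counter pass and sort-plus-adjacency scan by per-element count checks and a closed-form min/max range test (simpler; no sort).

-- ===== PORT A =====
def is_pair_sequence_py (values : List Int) (expected_pairs : Int) : Bool :=
  -- if 12 in values: return False
  if 12 ∈ values then false
  -- if len(set(values)) != expected_pairs: return False
  else if PySem.Set.len (PySem.Set.ofList values) ≠ expected_pairs then false
  else
    -- counts = Counter(values); if any(c != 2 for c in counts.values()): return False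
    let counts := PySem.Dict.counter values
    if counts.values.any (fun c => c != 2) then false
    else
      -- unique_vals = sorted(list(set(values)))
      let unique_vals := PySem.List.sorted (PySem.Set.ofList values) (fun x => x) false
      -- for i in range(len(unique_vals) - 1): if unique_vals[i+1] != unique_vals[i] + 1: return False
      -- return True
      (PySem.List.pyRange 0 (PySem.List.len unique_vals - 1) 1).all (fun i =>
        PySem.List.pyGetD unique_vals (i + 1) 0 == PySem.List.pyGetD unique_vals i 0 + 1)

-- ===== PORT B =====
def is_pair_sequence_py_alt (values : List Int) (expected_pairs : Int) : Bool :=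
  if 12 ∈ values then false
  else
    let uniq : PySem.Set Int := PySem.Set.ofList values
    if PySem.Set.len uniq ≠ expected_pairs then false
    else if uniq.any (fun v => PySem.List.count values v != 2) then false
    else
      -- if uniq and max(uniq) - min(uniq) != len(uniq) - 1: return False
      -- return True
      match PySem.List.max? uniq (fun x => x), PySem.List.min? uniq (fun x => x) with
      | some mx, some mn => if mx - mn ≠ PySem.Set.len uniq - 1 then false else true
      | _, _ => true

-- ===== PRECONDITION & SPEC =====
def Spec_is_pair_sequence_py (values : List Int) (expected_pairs : Int) (out : Bool) : Prop := out = is_pair_sequence_py_alt values expected_pairs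
instance (values : List Int) (expected_pairs : Int) (out : Bool) : Decidable (Spec_is_pair_sequence_py values expected_pairs out) := by unfold Spec_is_pair_sequence_py; infer_instance

-- ===== CLAIM (what is proved, stated in full; the proofs are below) =====
def Claim_equal_is_pair_sequence_py : Prop := ∀ (values : List Int) (expected_pairs : Int), Dom_is_pair_sequence_py values expected_pairs → Spec_is_pair_sequence_py values expected_pairs (is_pair_sequence_py values expected_pairs)

-- ===== LEMMAS AND PROOFS =====

-- In a strictly increasing Int list a :: t, the last element is at least a + |t|.
theorem pv_last_ge (a : Int) (t : List Int) (h : (a :: t).Pairwise (· < ·)) :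
    a + t.length ≤ t.getLastD a := by
  induction t generalizing a with
  | nil => simp
  | cons b t' ih =>
    have hp := List.pairwise_cons.mp h
    have hab : a < b := hp.1 b (by simp)
    have hb := ih b hp.2
    simp only [List.getLastD_cons, List.length_cons] at *
    push_cast at *
    omega

-- In a strictly increasing Int list a :: t, every member is at most the last element.
theorem pv_mem_le_last (a x : Int) (t : List Int) (h : (a :: t).Pairwise (· < ·))
    (hx : x ∈ a :: t) : x ≤ t.getLastD a := by
  induction t generalizing a with
  | nil =>
    simp only [List.mem_singleton] at hx
    simp [hx]
  | cons b t' ih =>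
    have hp := List.pairwise_cons.mp h
    rw [List.getLastD_cons]
    rcases List.mem_cons.mp hx with rfl | hxt
    · have hab : x < b := hp.1 b (by simp)
      have hge := pv_last_ge b t' hp.2
      have hlen : (0 : Int) ≤ (t'.length : Int) := by positivity
      omega
    · exact ih b hp.2 hxt

-- In a strictly increasing Int list a :: t, the +1-chain condition is exactly "last = a + |t|".
theorem pv_chain_iff_last (a : Int) (t : List Int) (h : (a :: t).Pairwise (· < ·)) :
    List.IsChain (fun x y : Int => y = x + 1) (a :: t) ↔ t.getLastD a = a + t.length := by
  induction t generalizing a with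
  | nil => simp
  | cons b t' ih =>
    have hp := List.pairwise_cons.mp h
    have hab : a < b := hp.1 b (by simp)
    have hge := pv_last_ge b t' hp.2
    have ihb := ih b hp.2
    rw [List.isChain_cons_cons, List.getLastD_cons]
    simp only [List.length_cons] at *
    push_cast at *
    constructor
    · rintro ⟨rfl_ab, hc⟩
      have := ihb.mp hc
      omega
    · intro hlast
      have hb1 : b = a + 1 := by omega
      exact ⟨hb1, ihb.mpr (by omega)⟩

-- A's indexed adjacency scan over range(len-1) is the +1-chain condition.
theorem pv_scan_eq_chain (s : List Int) :
    ((PySem.List.pyRange 0 (PySem.List.len s - 1) 1).all (fun i =>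
        PySem.List.pyGetD s (i + 1) 0 == PySem.List.pyGetD s i 0 + 1))
      = decide (List.IsChain (fun x y : Int => y = x + 1) s) := by
  rw [Bool.eq_iff_iff]
  simp only [List.all_eq_true, PySem.List.mem_pyRange_one, PySem.List.len_eq, beq_iff_eq,
    decide_eq_true_eq, List.isChain_iff_getElem]
  constructor
  · intro hall i hi
    have h2 := hall (i : Int) ⟨by positivity, by omega⟩
    rw [show ((i : Int) + 1) = ((i + 1 : Nat) : Int) by push_cast; ring] at h2
    rw [PySem.List.pyGetD_natCast, PySem.List.pyGetD_natCast,
      List.getD_eq_getElem s 0 (by omega), List.getD_eq_getElem s 0 (by omega)] at h2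
    exact h2
  · intro hc i hmem
    obtain ⟨h0, h1⟩ := hmem
    obtain ⟨n, rfl⟩ : ∃ n : Nat, i = (n : Int) := ⟨i.toNat, (Int.toNat_of_nonneg h0).symm⟩
    have hn : n + 1 < s.length := by omega
    rw [show ((n : Int) + 1) = ((n + 1 : Nat) : Int) by push_cast; ring]
    rw [PySem.List.pyGetD_natCast, PySem.List.pyGetD_natCast,
      List.getD_eq_getElem s 0 (by omega), List.getD_eq_getElem s 0 (by omega)]
    exact hc n hn

-- A's "every Counter value is 2" test equals B's per-element count test.
theorem pv_counts_eq (values : List Int) :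
    ((PySem.Dict.counter values).values.any (fun c => c != 2))
      = ((PySem.Set.ofList values).any (fun v => PySem.List.count values v != 2)) := by
  rw [PySem.Dict.values_eq_map_keys _ (PySem.Dict.nodup_keys_counter values) 0,
    PySem.Dict.keys_counter, List.any_map]
  apply PySem.List.any_congr_mem
  intro x hx
  simp only [Function.comp, PySem.Dict.getD_counter, PySem.List.count_eq]
  rw [Bool.eq_iff_iff]
  simp only [bne_iff_ne, ne_eq]
  constructor <;> intro h <;> omega

-- The tail of A (sort + adjacency scan) equals the tail of B (min/max range test).
theorem pv_tail_eq (values : List Int) :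
    ((PySem.List.pyRange 0
        (PySem.List.len (PySem.List.sorted (PySem.Set.ofList values) (fun x => x) false) - 1) 1).all
      (fun i =>
        PySem.List.pyGetD (PySem.List.sorted (PySem.Set.ofList values) (fun x => x) false) (i + 1) 0 ==
        PySem.List.pyGetD (PySem.List.sorted (PySem.Set.ofList values) (fun x => x) false) i 0 + 1))
      = (match PySem.List.max? (PySem.Set.ofList values) (fun x => x),
               PySem.List.min? (PySem.Set.ofList values) (fun x => x) with
         | some mx, some mn =>
             if mx - mn ≠ PySem.Set.len (PySem.Set.ofList values) - 1 then false else true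
         | _, _ => true) := by
  rw [pv_scan_eq_chain]
  cases hmx : PySem.List.max? (PySem.Set.ofList values) (fun x => x) with
  | none =>
    have huniq := (PySem.List.max?_eq_none_iff _ _).mp hmx
    rw [huniq, (PySem.List.sorted_eq_nil_iff ([] : List Int) (fun x : Int => x) false).mpr rfl]
    simp
  | some mx =>
    have hne : PySem.Set.ofList values ≠ [] := by
      intro h0
      rw [h0] at hmx
      simp [PySem.List.max?] at hmx
    cases hmn : PySem.List.min? (PySem.Set.ofList values) (fun x => x) with
    | none => exact absurd ((PySem.List.min?_eq_none_iff _ _).mp hmn) hne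
    | some mn =>
      have hperm := PySem.List.sorted_perm (PySem.Set.ofList values) (fun x : Int => x) false
      have hpw := PySem.List.sorted_ofList_pairwise_lt (κ := Int) values
      obtain ⟨a, t, hs⟩ : ∃ a t, PySem.List.sorted (PySem.Set.ofList values) (fun x : Int => x) false = a :: t := by
        cases hsc : PySem.List.sorted (PySem.Set.ofList values) (fun x : Int => x) false with
        | nil => exact absurd ((PySem.List.sorted_eq_nil_iff _ _ _).mp hsc) hne
        | cons a t => exact ⟨a, t, rfl⟩
      rw [hs] at hperm hpw ⊢
      -- mx is the last element of the sorted list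
      have hlast_mem : t.getLastD a ∈ a :: t := List.getLastD_mem_cons
      have hmx_mem : mx ∈ a :: t := hperm.mem_iff.mpr (PySem.List.max?_mem hmx)
      have hmx_eq : mx = t.getLastD a := by
        have h1 : mx ≤ t.getLastD a := pv_mem_le_last a mx t hpw hmx_mem
        have h2 : t.getLastD a ≤ mx := PySem.List.max?_isMax hmx _ (hperm.mem_iff.mp hlast_mem)
        omega
      -- mn is the head of the sorted list
      have hmn_mem : mn ∈ a :: t := hperm.mem_iff.mpr (PySem.List.min?_mem hmn)
      have hmn_eq : mn = a := by
        have h1 : mn ≤ a := PySem.List.min?_isMin hmn a (hperm.mem_iff.mp (by simp))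
        have h2 : a ≤ mn := by
          rcases List.mem_cons.mp hmn_mem with rfl | hmt
          · omega
          · have := (List.pairwise_cons.mp hpw).1 mn hmt
            omega
        omega
      have hlen : (PySem.Set.ofList values).length = t.length + 1 := by
        rw [← hperm.length_eq, List.length_cons]
      change decide _ = if mx - mn ≠ PySem.Set.len (PySem.Set.ofList values) - 1 then false else true
      rw [hmx_eq, hmn_eq]
      simp only [PySem.Set.len, hlen]
      split_ifs with hcond
      · rw [decide_eq_false_iff_not, pv_chain_iff_last a t hpw]
        push_cast at hcond ⊢
        omega
      · rw [decide_eq_true_eq, pv_chain_iff_last a t hpw]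
        push_cast at hcond ⊢
        omega

-- ===== VERDICT (by name: the statement is the Claim_ definition above) =====
theorem is_pair_sequence_py_spec : Claim_equal_is_pair_sequence_py := by
  unfold Claim_equal_is_pair_sequence_py
  intro values expected_pairs _
  simp only [Spec_is_pair_sequence_py, is_pair_sequence_py, is_pair_sequence_py_alt]
  by_cases h12 : 12 ∈ values
  · simp [h12]
  rw [if_neg h12, if_neg h12]
  by_cases hlen : PySem.Set.len (PySem.Set.ofList values) ≠ expected_pairs
  · rw [if_pos hlen, if_pos hlen]
  rw [if_neg hlen, if_neg hlen]
  rw [pv_counts_eq values]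
  by_cases hcnt : (PySem.Set.ofList values).any (fun v => PySem.List.count values v != 2) = true
  · rw [if_pos hcnt, if_pos hcnt]
  rw [if_neg hcnt, if_neg hcnt]
  exact pv_tail_eq values
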